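-- pv_equiv track=rewrite | github.com/bchwast/AGH-WDI | Kolokwia 19_20/k1_gr2_ex2.py | wycinianie
-- ===== SOURCE A (Python) =====
-- def wielokrotnosc(num):
--     i = 2
--     while num >= 2*i*i:
--         dod = i*i
--         j = 2*dod
--         while num >= j:
--             if num == j:
--                 return True
--             j += dod
--         i += 1
--     #end while
--     return False
--
-- def wycinianie(tab):
--     n = len(tab)
--     for rem_w in range(n):
--         for rem_k1 in range(n):
--             for rem_k2 in range(n):
--                 if rem_k1 != rem_k2:
--                     okay = True
--                     for w in range(n):
--                         for k in range(n):
--                             if w != rem_w and k != rem_k1 and k != rem_k2: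
--                                 if not wielokrotnosc(tab[w][k]):
--                                     okay = False
--                                     break
--                         #end for
--                         if not okay:
--                             break
--                     #end for
--                     if okay:
--                         return True
--             #end for
--         #end for
--     #end for
--     return False
-- ===== SOURCE B (Python) =====
-- def wielokrotnosc(num):
--     # num is a nontrivial multiple of a nontrivial square iff some i*i (i >= 2)
--     # divides num with quotient >= 2; test divisibility directly instead of
--     # enumerating all multiples of i*i.
--     i = 2
--     while 2*i*i <= num:
--         if num % (i*i) == 0:
--             return True
--         i += 1
--     return False
--
-- def wycinianie(tab):
--     n = len(tab)
--     if n <= 2: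
--         # n == 2: removing two distinct columns erases every checked cell;
--         # n < 2: no pair of distinct columns exists.
--         return n == 2
--     bad = []
--     for w, row in enumerate(tab):
--         for k, v in enumerate(row[:n]):
--             if not wielokrotnosc(v):
--                 bad.append((w, k))
--     for rem_w in range(n):
--         cols = set(k for (w, k) in bad if w != rem_w)
--         if len(cols) <= 2:
--             return True
--     return False
-- ===== Notes on version B (the rewrite author's own statement) =====
-- stated objective: faster
-- what changed: A tries every (row, col1, col2) triple and rescans the whole table for each; B tests each cell once with a divisibility-based wielokrotnosc (modulo instead of enumerating multiples), collects the sparse list of bad (row, col) cells, and per removed row checks that the remaining bad cells span at most 2 distinct columns.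
-- outside the precondition, e.g. on wycinianie([[8], [8, 8, 8], [8, 8, 8]]): A returns True, B returns True
import Mathlib
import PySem

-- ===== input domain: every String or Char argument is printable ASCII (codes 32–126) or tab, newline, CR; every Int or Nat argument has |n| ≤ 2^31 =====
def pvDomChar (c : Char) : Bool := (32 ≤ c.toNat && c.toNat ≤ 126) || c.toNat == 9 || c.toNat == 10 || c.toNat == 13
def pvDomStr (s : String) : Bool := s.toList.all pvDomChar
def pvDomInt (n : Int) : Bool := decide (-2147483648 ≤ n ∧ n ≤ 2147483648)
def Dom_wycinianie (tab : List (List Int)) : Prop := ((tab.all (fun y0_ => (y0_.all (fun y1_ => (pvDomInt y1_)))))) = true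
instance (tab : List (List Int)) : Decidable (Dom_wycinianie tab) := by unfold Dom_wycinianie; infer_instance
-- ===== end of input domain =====

-- B replaces A's O(n^5) brute force over (row, col1, col2) triples by a divisibility
-- test per cell, a sparse list of bad cells, and a per-row check that the remaining
-- bad cells span at most 2 distinct columns.

-- ===== PORT A =====
-- inner 'while num >= j: if num == j: return True; j += dod'
def wielInner (num : Int) (dod j : Nat) (hd : 0 < dod) : Bool :=
  if h : (j : Int) ≤ num then
    if num = (j : Int) then true else wielInner num dod (j + dod) hd
  else false
termination_by (num + 1 - (j : Int)).toNat
decreasing_by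
  have hd' : (1 : Int) ≤ (dod : Int) := by exact_mod_cast hd
  push_cast
  omega

-- outer 'while num >= 2*i*i: … i += 1'
def wielOuter (num : Int) (i : Nat) (hi : 2 ≤ i) : Bool :=
  if h : (2 * i * i : Int) ≤ num then
    if wielInner num (i * i) (2 * (i * i)) (Nat.mul_pos (by omega) (by omega)) then true
    else wielOuter num (i + 1) (by omega)
  else false
termination_by (num + 1 - 2 * (i : Int) * (i : Int)).toNat
decreasing_by
  have h1 : (0 : Int) < num + 1 - 2 * (i : Int) * (i : Int) := by linarith
  have h2 : num + 1 - 2 * ((i : Int) + 1) * ((i : Int) + 1) <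
      num + 1 - 2 * (i : Int) * (i : Int) := by nlinarith [Int.natCast_nonneg i]
  push_cast
  omega

def wielokrotnosc (num : Int) : Bool := wielOuter num 2 (by omega)

-- tab[w][k]; for a ragged table with a row shorter than len(tab) the Python can raise
-- IndexError, which Pre_ excludes
def cellAt (tab : List (List Int)) (w k : Nat) : Int := (tab.getD w []).getD k 0

def wycinianie (tab : List (List Int)) : Bool :=
  let n := tab.length
  (List.range n).any fun rw =>
    (List.range n).any fun k1 =>
      (List.range n).any fun k2 =>
        decide (k1 ≠ k2) &&
          ((List.range n).all fun w =>
            (List.range n).all fun k =>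
              -- 'if w != rem_w and k != rem_k1 and k != rem_k2: if not wiel…: okay = False'
              if w ≠ rw ∧ k ≠ k1 ∧ k ≠ k2 then wielokrotnosc (cellAt tab w k) else true)

-- ===== PORT B =====
-- 'while 2*i*i <= num: if num % (i*i) == 0: return True; i += 1'
def wielTest (num : Int) (i : Nat) (hi : 2 ≤ i) : Bool :=
  if h : (2 * i * i : Int) ≤ num then
    if PySem.Int.mod num (i * i) = 0 then true
    else wielTest num (i + 1) (by omega)
  else false
termination_by (num + 1 - 2 * (i : Int) * (i : Int)).toNat
decreasing_by
  have h1 : (0 : Int) < num + 1 - 2 * (i : Int) * (i : Int) := by linarith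
  have h2 : num + 1 - 2 * ((i : Int) + 1) * ((i : Int) + 1) <
      num + 1 - 2 * (i : Int) * (i : Int) := by nlinarith [Int.natCast_nonneg i]
  push_cast
  omega

def wielokrotnoscB (num : Int) : Bool := wielTest num 2 (by omega)

-- 'for w, row in enumerate(tab): for k, v in enumerate(row[:n]): if not wiel(v): bad.append((w,k))'
def badCells (tab : List (List Int)) : List (Nat × Nat) :=
  tab.zipIdx.flatMap fun rw =>
    (rw.1.take tab.length).zipIdx.filterMap fun vk =>
      if wielokrotnoscB vk.1 then none else some (rw.2, vk.2)

def wycinianie_alt (tab : List (List Int)) : Bool :=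
  let n := tab.length
  if n ≤ 2 then decide (n = 2)
  else
    let bad := badCells tab
    (List.range n).any fun rw =>
      -- 'cols = set(k for (w, k) in bad if w != rem_w); len(cols) <= 2'
      (PySem.Set.ofList ((bad.filter fun p => p.1 ≠ rw).map Prod.snd)).length ≤ 2

-- ===== PRECONDITION & SPEC =====
-- Pre_ excludes ragged tables with at least 3 rows and some row shorter than the row count:
-- there A's tab[w][k] generally raises IndexError (though A can return True before reaching
-- the short row, as in the cited example, where B also returns True).
def Pre_wycinianie (tab : List (List Int)) : Prop :=
  tab.length ≤ 2 ∨ ∀ row ∈ tab, tab.length ≤ row.length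
instance (tab : List (List Int)) : Decidable (Pre_wycinianie tab) := by
  unfold Pre_wycinianie; infer_instance

def pvWitness_wycinianie : List (List Int) := [[8, 8, 8], [8, 7, 8], [8, 8, 8]]

def Spec_wycinianie (tab : List (List Int)) (out : Bool) : Prop := out = wycinianie_alt tab
instance (tab : List (List Int)) (out : Bool) : Decidable (Spec_wycinianie tab out) := by
  unfold Spec_wycinianie; infer_instance

-- ===== CLAIM (what is proved, stated in full; the proofs are below) =====
def Claim_equal_wycinianie : Prop := ∀ (tab : List (List Int)), Dom_wycinianie tab → Pre_wycinianie tab → Spec_wycinianie tab (wycinianie tab)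

-- ===== LEMMAS AND PROOFS =====

-- the two wielokrotnosc implementations agree
theorem wielInner_iff (num : Int) (dod j : Nat) (hd : 0 < dod) :
    wielInner num dod j hd = true ↔ ∃ m : Nat, num = (j : Int) + m * dod := by
  fun_induction wielInner with
  | case1 j h heq =>
      simp only [true_iff]
      exact ⟨0, by simpa using heq⟩
  | case2 j h hne ih =>
      rw [ih]
      constructor
      · rintro ⟨m, hm⟩
        exact ⟨m + 1, by push_cast at hm ⊢; linarith⟩
      · rintro ⟨m, hm⟩
        match m with
        | 0 => exact absurd (by simpa using hm) hne
        | m + 1 => exact ⟨m, by push_cast at hm ⊢; linarith⟩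
  | case3 j h =>
      simp only [Bool.false_eq_true, false_iff]
      rintro ⟨m, hm⟩
      have hmd : (0 : Int) ≤ (m : Int) * dod := by positivity
      exact h (by push_cast at hm ⊢; linarith)

theorem wielOuter_eq_wielTest (num : Int) (i : Nat) (hi : 2 ≤ i) :
    wielOuter num i hi = wielTest num i hi := by
  fun_induction wielOuter with
  | case1 i hi h hin =>
      rw [wielTest]
      rw [dif_pos h, if_pos]
      rw [PySem.Int.mod_eq_zero_iff_dvd]
      obtain ⟨m, hm⟩ := (wielInner_iff num (i * i) (2 * (i * i)) _).mp hin
      exact ⟨2 + m, by push_cast at hm ⊢; linarith⟩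
  | case2 i hi h hin ih =>
      rw [wielTest]
      rw [dif_pos h, if_neg, ih]
      intro hmod
      obtain ⟨q, hq⟩ := (PySem.Int.mod_eq_zero_iff_dvd num (i * i)).mp hmod
      have hipos : (0 : Int) < (i : Int) * (i : Int) := by
        have : (2 : Int) ≤ (i : Int) := by exact_mod_cast hi
        nlinarith
      have hq2 : 2 ≤ q := by
        by_contra hlt
        push_neg at hlt
        have : q * ((i : Int) * (i : Int)) ≤ 1 * ((i : Int) * (i : Int)) := by
          apply mul_le_mul_of_nonneg_right (by omega) (le_of_lt hipos)
        push_cast at h hq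
        nlinarith
      have : wielInner num (i * i) (2 * (i * i)) (Nat.mul_pos (by omega) (by omega)) = true := by
        rw [wielInner_iff]
        refine ⟨(q - 2).toNat, ?_⟩
        have h2 : ((q - 2).toNat : Int) = q - 2 := Int.toNat_of_nonneg (by omega)
        rw [h2]
        push_cast at hq ⊢
        linarith [hq]
      rw [this] at hin
      exact absurd rfl hin
  | case3 i hi h =>
      rw [wielTest, dif_neg h]

theorem wiel_eq (num : Int) : wielokrotnosc num = wielokrotnoscB num :=
  wielOuter_eq_wielTest num 2 (by omega)

theorem wyc_A_iff (tab : List (List Int)) :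
    wycinianie tab = true ↔
      ∃ rw < tab.length, ∃ k1 < tab.length, ∃ k2 < tab.length, k1 ≠ k2 ∧
        ∀ w < tab.length, ∀ k < tab.length, w ≠ rw → k ≠ k1 → k ≠ k2 →
          wielokrotnosc (cellAt tab w k) = true := by
  simp only [wycinianie, List.any_eq_true, List.all_eq_true, List.mem_range,
    Bool.and_eq_true, decide_eq_true_eq]
  constructor
  · rintro ⟨rw, hrw, k1, hk1, k2, hk2, hne, hall⟩
    refine ⟨rw, hrw, k1, hk1, k2, hk2, hne, ?_⟩
    intro w hw k hk h1 h2 h3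
    have := hall w hw k hk
    rwa [if_pos ⟨h1, h2, h3⟩] at this
  · rintro ⟨rw, hrw, k1, hk1, k2, hk2, hne, hall⟩
    refine ⟨rw, hrw, k1, hk1, k2, hk2, hne, ?_⟩
    intro w hw k hk
    split_ifs with hc
    · exact hall w hw k hk hc.1 hc.2.1 hc.2.2
    · rfl

-- membership in B's bad-cell list, on tables whose rows all have length ≥ n
theorem mem_badCells (tab : List (List Int)) (hre : ∀ row ∈ tab, tab.length ≤ row.length)
    (w k : Nat) :
    (w, k) ∈ badCells tab ↔
      w < tab.length ∧ k < tab.length ∧ wielokrotnosc (cellAt tab w k) = false := by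
  simp only [badCells, List.mem_flatMap, List.mem_filterMap]
  constructor
  · rintro ⟨⟨row, w'⟩, hmem, ⟨v, k'⟩, hmem2, hif⟩
    rw [List.mem_zipIdx_iff_getElem?] at hmem hmem2
    simp only at hmem hmem2
    split_ifs at hif with hwb
    · simp only [Option.some.injEq, Prod.mk.injEq] at hif
      obtain ⟨hw1, hk1⟩ := hif
      rw [hw1] at hmem
      rw [hk1] at hmem2
      obtain ⟨hwlt, hroweq⟩ := List.getElem?_eq_some_iff.mp hmem
      obtain ⟨hklt, hveq⟩ := List.getElem?_eq_some_iff.mp hmem2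
      have hkn : k < tab.length := by simp [List.length_take] at hklt; omega
      have hklen : k < row.length := by simp [List.length_take] at hklt; omega
      refine ⟨hwlt, hkn, ?_⟩
      have hcell : cellAt tab w k = v := by
        rw [← hveq, List.getElem_take]
        simp [cellAt, List.getD_eq_getElem?_getD, hmem, List.getElem?_eq_getElem hklen]
      rw [hcell, wiel_eq]
      simpa using hwb
  · rintro ⟨hw, hk, hbad⟩
    have hklen : k < tab[w].length := lt_of_lt_of_le hk (hre _ (List.getElem_mem hw))
    have hkt : k < (tab[w].take tab.length).length := by simp [List.length_take]; omega
    refine ⟨(tab[w], w), ?_, ⟨((tab[w].take tab.length)[k], k), ?_, ?_⟩⟩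
    · rw [List.mem_zipIdx_iff_getElem?]
      simpa using List.getElem?_eq_getElem hw
    · rw [List.mem_zipIdx_iff_getElem?]
      simpa using List.getElem?_eq_getElem hkt
    · have hcv : ((tab[w].take tab.length)[k], k).1 = cellAt tab w k := by
        simp only
        rw [List.getElem_take]
        simp [cellAt, List.getD_eq_getElem?_getD, List.getElem?_eq_getElem hw,
          List.getElem?_eq_getElem hklen]
      have hnb : ¬ wielokrotnoscB (((tab[w].take tab.length)[k], k).1) = true := by
        rw [hcv, ← wiel_eq, hbad]
        simp
      simp only [if_neg hnb]

-- the combinatorial core: two removable columns exist iff the bad columns span ≤ 2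
theorem wyc_core (n : Nat) (hn : 3 ≤ n) (g : Nat → Nat → Bool) (rw : Nat) :
    (∃ k1 < n, ∃ k2 < n, k1 ≠ k2 ∧
        ∀ w < n, ∀ k < n, w ≠ rw → k ≠ k1 → k ≠ k2 → g w k = true) ↔
      ((List.range n).filter fun k =>
          decide (∃ w < n, w ≠ rw ∧ g w k = false)).length ≤ 2 := by
  set L := (List.range n).filter fun k => decide (∃ w < n, w ≠ rw ∧ g w k = false) with hL
  have hnodup : L.Nodup := (List.nodup_range).filter _
  have hmemL : ∀ k, k ∈ L ↔ (k < n ∧ ∃ w < n, w ≠ rw ∧ g w k = false) := by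
    intro k
    simp [hL, List.mem_filter, List.mem_range]
  constructor
  · rintro ⟨k1, hk1, k2, hk2, hne, hP⟩
    have hsub : L.toFinset ⊆ ({k1, k2} : Finset ℕ) := by
      intro k hkmem
      rw [List.mem_toFinset, hmemL] at hkmem
      obtain ⟨hkn, w, hw, hwne, hbad⟩ := hkmem
      by_contra hnot
      simp only [Finset.mem_insert, Finset.mem_singleton] at hnot
      push_neg at hnot
      have := hP w hw k hkn hwne hnot.1 hnot.2
      rw [this] at hbad
      exact absurd hbad (by simp)
    calc L.length = L.toFinset.card := (List.toFinset_card_of_nodup hnodup).symm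
      _ ≤ ({k1, k2} : Finset ℕ).card := Finset.card_le_card hsub
      _ ≤ 2 := by
          calc ({k1, k2} : Finset ℕ).card ≤ ({k2} : Finset ℕ).card + 1 :=
                Finset.card_insert_le _ _
            _ = 2 := by simp
  · intro hlen
    have hcover : ∃ k1 k2, k1 < n ∧ k2 < n ∧ k1 ≠ k2 ∧ ∀ k ∈ L, k = k1 ∨ k = k2 := by
      rcases hEq : L with _ | ⟨a, _ | ⟨b, _ | ⟨c, t⟩⟩⟩
      · exact ⟨0, 1, by omega, by omega, by omega, by simp⟩
      · have ha : a < n := ((hmemL a).mp (by rw [hEq]; simp)).1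
        refine ⟨a, if a = 0 then 1 else 0, ha, by split <;> omega, by split <;> omega, ?_⟩
        intro k hk
        simp at hk
        exact Or.inl hk
      · have ha : a < n := ((hmemL a).mp (by rw [hEq]; simp)).1
        have hb : b < n := ((hmemL b).mp (by rw [hEq]; simp)).1
        have hab : a ≠ b := by
          have := hnodup
          rw [hEq] at this
          simp at this
          exact this
        refine ⟨a, b, ha, hb, hab, ?_⟩
        intro k hk
        simpa using hk
      · exfalso
        rw [hEq] at hlen
        simp at hlen
    obtain ⟨k1, k2, hk1, hk2, hne, hcov⟩ := hcover
    refine ⟨k1, hk1, k2, hk2, hne, ?_⟩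
    intro w hw k hk hwne h1 h2
    by_contra hbad
    have hbad' : g w k = false := by
      cases hgk : g w k
      · rfl
      · exact absurd hgk hbad
    have hkL : k ∈ L := (hmemL k).mpr ⟨hk, w, hw, hwne, hbad'⟩
    rcases hcov k hkL with h | h
    · exact h1 h
    · exact h2 h

-- two Nodup lists with the same members have the same length
theorem length_eq_of_nodup_mem {L1 L2 : List Nat} (h1 : L1.Nodup) (h2 : L2.Nodup)
    (hmem : ∀ k, k ∈ L1 ↔ k ∈ L2) : L1.length = L2.length := by
  rw [← List.toFinset_card_of_nodup h1, ← List.toFinset_card_of_nodup h2]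
  congr 1
  ext k
  simp [hmem k]

-- B's column set for one removed row has the length of the filtered range
theorem cols_length (tab : List (List Int)) (hn : 3 ≤ tab.length)
    (hre : ∀ row ∈ tab, tab.length ≤ row.length) (rw : Nat) :
    (PySem.Set.ofList (((badCells tab).filter fun p => p.1 ≠ rw).map Prod.snd)).length =
      ((List.range tab.length).filter fun k =>
        decide (∃ w < tab.length, w ≠ rw ∧ wielokrotnosc (cellAt tab w k) = false)).length := by
  apply length_eq_of_nodup_mem
  · exact PySem.Set.nodup_ofList _
  · exact (List.nodup_range).filter _
  · intro k
    rw [PySem.Set.mem_ofList]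
    simp only [List.mem_map, List.mem_filter, List.mem_range, decide_eq_true_eq]
    constructor
    · rintro ⟨⟨w, k'⟩, ⟨hmem, hwne⟩, hk⟩
      simp only at hk hwne
      obtain ⟨hw, hkn, hbad⟩ := (mem_badCells tab hre w k').mp hmem
      rw [← hk]
      exact ⟨hkn, w, hw, by simpa using hwne, hbad⟩
    · rintro ⟨hkn, w, hw, hwne, hbad⟩
      exact ⟨(w, k), ⟨(mem_badCells tab hre w k).mpr ⟨hw, hkn, hbad⟩, by simpa using hwne⟩, rfl⟩

-- small tables: A returns true exactly when n = 2
theorem wyc_small (tab : List (List Int)) (h : tab.length ≤ 2) :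
    wycinianie tab = decide (tab.length = 2) := by
  rw [Bool.eq_iff_iff, wyc_A_iff, decide_eq_true_eq]
  constructor
  · rintro ⟨rw, hrw, k1, hk1, k2, hk2, hne, -⟩
    omega
  · intro h2
    refine ⟨0, by omega, 0, by omega, 1, by omega, by omega, ?_⟩
    intro w hw k hk hwne h1' h2'
    omega

theorem wyc_eq (tab : List (List Int)) (hpre : Pre_wycinianie tab) :
    wycinianie tab = wycinianie_alt tab := by
  by_cases h : tab.length ≤ 2
  · rw [wyc_small tab h]
    simp [wycinianie_alt, if_pos h]
  · have h3 : 3 ≤ tab.length := by omega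
    have hre : ∀ row ∈ tab, tab.length ≤ row.length := by
      rcases hpre with h2 | h2
      · omega
      · exact h2
    rw [Bool.eq_iff_iff, wyc_A_iff]
    simp only [wycinianie_alt, if_neg h, List.any_eq_true, List.mem_range,
      decide_eq_true_eq]
    constructor
    · rintro ⟨rw, hrw, hrest⟩
      refine ⟨rw, hrw, ?_⟩
      rw [cols_length tab h3 hre rw]
      exact (wyc_core tab.length h3
        (fun w k => wielokrotnosc (cellAt tab w k)) rw).mp hrest
    · rintro ⟨rw, hrw, hlen⟩
      rw [cols_length tab h3 hre rw] at hlen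
      exact ⟨rw, hrw, (wyc_core tab.length h3
        (fun w k => wielokrotnosc (cellAt tab w k)) rw).mpr hlen⟩

-- ===== VERDICT (by name: the statement is the Claim_ definition above) =====
theorem wycinianie_spec : Claim_equal_wycinianie := by
  intro tab _ hpre
  unfold Spec_wycinianie
  exact wyc_eq tab hpre
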